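-- pv_equiv track=rewrite | github.com/bthomas-a11y/contractsafe-agent | agents/brand_voice_pass.py | _rejoin_broken_continuations
-- ===== SOURCE A (Python) =====
-- def _rejoin_broken_continuations(text: str) -> str:
--     """Rejoin lines that were broken mid-sentence.
--
--     Detects when a line doesn't end with sentence-ending punctuation and the
--     next non-blank line starts with a lowercase word (indicating it was split
--     from the previous line). Joins them back so downstream list/link fixers
--     see complete text.
--     """
--     lines = text.split('\n')
--     result = []
--     i = 0
--     while i < len(lines):
--         stripped = lines[i].strip()
--
--         # Skip empty, structural, or very short lines
--         if (not stripped or stripped.startswith('#') or stripped == '---'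
--                 or stripped.startswith('|') or stripped.startswith('>')):
--             result.append(lines[i])
--             i += 1
--             continue
--
--         # Check if line doesn't end with sentence-ending punctuation
--         if stripped[-1] not in '.!?:':
--             # Look for continuation on next non-blank line
--             j = i + 1
--             while j < len(lines) and not lines[j].strip():
--                 j += 1
--
--             if j < len(lines):
--                 next_s = lines[j].strip()
--                 # Continuation: starts with lowercase, isn't structural
--                 if (next_s and next_s[0].islower()
--                         and not next_s.startswith('---')):
--                     # Join, skip blank lines in between
--                     result.append(stripped + ' ' + next_s)
--                     i = j + 1
--                     continue
--
--         result.append(lines[i])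
--         i += 1
--     return '\n'.join(result)
-- ===== SOURCE B (Python) =====
-- def _rejoin_broken_continuations(text: str) -> str:
--     """Single forward pass with a pending-line accumulator instead of index lookahead."""
--     out = []
--     pending = None   # (original line, stripped form) of an open, unterminated line
--     blanks = []      # blank lines buffered while a pending line is open
--     for line in text.split('\n'):
--         s = line.strip()
--         if pending is not None:
--             if not s:
--                 blanks.append(line)
--                 continue
--             if s[0].islower() and not s.startswith('---'):
--                 out.append(pending[1] + ' ' + s)
--                 pending = None
--                 blanks = []
--                 continue
--             out.append(pending[0])
--             out.extend(blanks)
--             pending = None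
--             blanks = []
--             # fall through: reprocess this line as a fresh candidate
--         if (not s or s.startswith('#') or s == '---' or s.startswith('|')
--                 or s.startswith('>') or s[-1] in '.!?:'):
--             out.append(line)
--         else:
--             pending = (line, s)
--     if pending is not None:
--         out.append(pending[0])
--         out.extend(blanks)
--     return '\n'.join(out)
-- ===== Notes on version B (the rewrite author's own statement) =====
-- stated objective: alternative
-- what changed: Replaces A's index-based while loop with an inner blank-skipping lookahead scan per line by a single forward pass over the lines holding a pending unterminated line and a buffer of blank lines, flushed or joined when the next non-blank line is seen.
import Mathlib
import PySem

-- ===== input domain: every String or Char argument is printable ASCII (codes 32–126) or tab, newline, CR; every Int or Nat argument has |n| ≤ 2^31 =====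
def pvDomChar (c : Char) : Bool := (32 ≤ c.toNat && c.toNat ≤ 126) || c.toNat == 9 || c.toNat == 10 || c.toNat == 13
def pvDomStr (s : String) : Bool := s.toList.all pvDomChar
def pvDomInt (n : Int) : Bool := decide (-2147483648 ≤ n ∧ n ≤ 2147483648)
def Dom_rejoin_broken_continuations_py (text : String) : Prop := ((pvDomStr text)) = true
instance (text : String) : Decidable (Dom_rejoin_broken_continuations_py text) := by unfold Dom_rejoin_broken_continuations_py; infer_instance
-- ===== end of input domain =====

-- B replaces A's index-based lookahead (inner blank-skipping scan per line) by a single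
-- forward pass holding a pending unterminated line plus a buffer of blank lines (objective: alternative).


-- Condition expressions that appear verbatim in BOTH Pythons (on an already-stripped line s):
-- "s.startswith('#') or s == '---' or s.startswith('|') or s.startswith('>')"
def pvStruct (s : String) : Bool :=
  PySem.Str.startswith s "#" || s == "---" || PySem.Str.startswith s "|" || PySem.Str.startswith s ">"
-- "s[-1] in '.!?:'" (only evaluated on nonempty s in both Pythons)
def pvEndsSent (s : String) : Bool :=
  match PySem.Str.pyGet? s (-1) with
  | some c => PySem.Str.isIn (String.singleton c) ".!?:"
  | none => false
-- A's continuation test "next_s and next_s[0].islower() and not next_s.startswith('---')"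
def pvJoinA (s : String) : Bool :=
  (!(s == "")) && (match PySem.Str.pyGet? s 0 with
                   | some c => PySem.Chars.islower c
                   | none => false) && !(PySem.Str.startswith s "---")
-- B's continuation test "s[0].islower() and not s.startswith('---')" (s already known nonempty)
def pvJoinB (s : String) : Bool :=
  (match PySem.Str.pyGet? s 0 with
   | some c => PySem.Chars.islower c
   | none => false) && !(PySem.Str.startswith s "---")

-- ===== PORT A =====
-- inner while loop "j = i + 1; while j < len(lines) and not lines[j].strip(): j += 1":
-- returns (skipped blank lines, first non-blank line, lines after it), or none if all remaining are blank
def pvSkipBlanks : List String → Option (List String × String × List String)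
  | [] => none
  | y :: r =>
    if PySem.Str.strip y == "" then
      match pvSkipBlanks r with
      | none => none
      | some (b, n, a) => some (y :: b, n, a)
    else some ([], y, r)

theorem pvSkipBlanks_length : ∀ (l : List String) (b : List String) (y : String) (a : List String),
    pvSkipBlanks l = some (b, y, a) → a.length < l.length := by
  intro l
  induction l with
  | nil => intro b y a h; simp [pvSkipBlanks] at h
  | cons x r ih =>
    intro b y a h
    simp only [pvSkipBlanks] at h
    by_cases hx : (PySem.Str.strip x == "") = true
    · simp only [hx, if_pos] at h
      cases hr : pvSkipBlanks r with
      | none => simp [hr] at h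
      | some t =>
        obtain ⟨b', y', a'⟩ := t
        simp only [hr, Option.some.injEq, Prod.mk.injEq] at h
        obtain ⟨h1, h2, h3⟩ := h
        have hlen := ih _ _ _ hr
        rw [← h3]
        simp only [List.length_cons]; omega
    · simp only [hx, if_neg, Bool.false_eq_true, not_false_iff, Option.some.injEq,
        Prod.mk.injEq] at h
      obtain ⟨h1, h2, h3⟩ := h
      subst h3
      simp
  
-- the outer while loop of A, as recursion on the remaining suffix of lines
def pvAgo : List String → List String
  | [] => []
  | x :: rest =>
    if PySem.Str.strip x == "" || pvStruct (PySem.Str.strip x) then x :: pvAgo rest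
    else if !pvEndsSent (PySem.Str.strip x) then
      match h : pvSkipBlanks rest with
      | some (_, y, a) =>
        if pvJoinA (PySem.Str.strip y) then
          (PySem.Str.strip x ++ " " ++ PySem.Str.strip y) :: pvAgo a
        else x :: pvAgo rest
      | none => x :: pvAgo rest
    else x :: pvAgo rest
termination_by l => l.length
decreasing_by
  · simp
  · have := pvSkipBlanks_length rest _ _ _ h
    simp only [List.length_cons]; omega
  · simp
  · simp
  · simp

def rejoin_broken_continuations_py (text : String) : String :=
  PySem.Str.join "\n" (pvAgo ((PySem.Str.split? text "\n").getD []))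

-- ===== PORT B =====
-- B's single forward pass: pending = the open unterminated line (original, stripped),
-- bl = blank lines buffered while pending is open
def pvBgo : List String → Option (String × String) → List String → List String
  | [], none, _ => []
  | [], some (o, _), bl => o :: bl
  | x :: rest, none, bl =>
    if PySem.Str.strip x == "" || pvStruct (PySem.Str.strip x) || pvEndsSent (PySem.Str.strip x) then
      x :: pvBgo rest none bl
    else pvBgo rest (some (x, PySem.Str.strip x)) bl
  | x :: rest, some (o, sp), bl =>
    if PySem.Str.strip x == "" then pvBgo rest (some (o, sp)) (bl ++ [x])
    else if pvJoinB (PySem.Str.strip x) then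
      (sp ++ " " ++ PySem.Str.strip x) :: pvBgo rest none []
    else o :: (bl ++ pvBgo (x :: rest) none [])
termination_by l p _ => l.length * 2 + (if p.isSome then 1 else 0)
decreasing_by all_goals simp [Option.isSome] <;> omega

def rejoin_broken_continuations_py_alt (text : String) : String :=
  PySem.Str.join "\n" (pvBgo ((PySem.Str.split? text "\n").getD []) none [])

-- ===== PRECONDITION & SPEC =====
def Spec_rejoin_broken_continuations_py (text : String) (out : String) : Prop := out = rejoin_broken_continuations_py_alt text
instance (text : String) (out : String) : Decidable (Spec_rejoin_broken_continuations_py text out) := by unfold Spec_rejoin_broken_continuations_py; infer_instance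

-- ===== CLAIM (what is proved, stated in full; the proofs are below) =====
def Claim_equal_rejoin_broken_continuations_py : Prop := ∀ (text : String), Dom_rejoin_broken_continuations_py text → Spec_rejoin_broken_continuations_py text (rejoin_broken_continuations_py text)

-- ===== LEMMAS AND PROOFS =====
theorem pvJoinA_eq_pvJoinB (s : String) (h : ¬ (s == "") = true) : pvJoinA s = pvJoinB s := by
  simp [pvJoinA, pvJoinB, h]

theorem pvSkipBlanks_all_blank : ∀ (bl : List String), (∀ b ∈ bl, (PySem.Str.strip b == "") = true) →
    pvSkipBlanks bl = none := by
  intro bl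
  induction bl with
  | nil => intro _; rfl
  | cons x r ih =>
    intro h
    have hx := h x (by simp)
    simp only [pvSkipBlanks, hx, if_pos, ih (fun b hb => h b (by simp [hb]))]

theorem pvSkipBlanks_blank_append : ∀ (bl : List String) (x : String) (rest : List String),
    (∀ b ∈ bl, (PySem.Str.strip b == "") = true) → ¬ (PySem.Str.strip x == "") = true →
    pvSkipBlanks (bl ++ x :: rest) = some (bl, x, rest) := by
  intro bl
  induction bl with
  | nil => intro x rest _ hx; simp [pvSkipBlanks, hx]
  | cons b t ih =>
    intro x rest h hx
    have hb := h b (by simp)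
    simp only [List.cons_append, pvSkipBlanks, hb, if_pos,
      ih x rest (fun b hb => h b (by simp [hb])) hx]

theorem pvAgo_blank_append : ∀ (bl : List String) (l : List String),
    (∀ b ∈ bl, (PySem.Str.strip b == "") = true) → pvAgo (bl ++ l) = bl ++ pvAgo l := by
  intro bl
  induction bl with
  | nil => intro l _; rfl
  | cons b t ih =>
    intro l h
    have hb := h b (by simp)
    rw [List.cons_append, pvAgo]
    simp only [hb, Bool.true_or, if_pos, List.cons_append]
    rw [ih l (fun b hb => h b (by simp [hb]))]

set_option maxHeartbeats 4000000 in
-- Main invariant: L1 — with no pending line B agrees with A; L2 — with pending line o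
-- (processable, unterminated) and buffered blanks bl, B's state equals A restarted at o.
theorem pvMain : ∀ (n : Nat),
    (∀ l : List String, l.length = n → pvAgo l = pvBgo l none []) ∧
    (∀ l : List String, l.length = n → ∀ (o : String) (bl : List String),
      ¬ (PySem.Str.strip o == "") = true → pvStruct (PySem.Str.strip o) = false →
      pvEndsSent (PySem.Str.strip o) = false → (∀ b ∈ bl, (PySem.Str.strip b == "") = true) →
      pvAgo (o :: (bl ++ l)) = pvBgo l (some (o, PySem.Str.strip o)) bl) := by
  intro n
  induction n using Nat.strong_induction_on with
  | _ n ih =>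
    have l1 : ∀ l : List String, l.length = n → pvAgo l = pvBgo l none [] := by
      intro l hl
      cases l with
      | nil => rw [pvAgo, pvBgo]
      | cons x rest =>
        rw [pvAgo, pvBgo]
        by_cases h1 : (PySem.Str.strip x == "" || pvStruct (PySem.Str.strip x)) = true
        · have h1' : (PySem.Str.strip x == "" || pvStruct (PySem.Str.strip x) || pvEndsSent (PySem.Str.strip x)) = true := by
            simp only [Bool.or_eq_true] at h1 ⊢; tauto
          rw [if_pos h1, if_pos h1']
          have := (ih rest.length (by subst hl; simp)).1 rest rfl
          rw [this]
        · by_cases h2 : pvEndsSent (PySem.Str.strip x) = true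
          · have h1' : (PySem.Str.strip x == "" || pvStruct (PySem.Str.strip x) || pvEndsSent (PySem.Str.strip x)) = true := by
              simp only [Bool.or_eq_true] at h1 ⊢; tauto
            rw [if_neg h1, if_pos h1', h2]
            simp only [Bool.not_true, Bool.false_eq_true, if_false]
            have := (ih rest.length (by subst hl; simp)).1 rest rfl
            rw [this]
          · have h1' : ¬ (PySem.Str.strip x == "" || pvStruct (PySem.Str.strip x) || pvEndsSent (PySem.Str.strip x)) = true := by
              simp only [Bool.or_eq_true] at h1 ⊢; tauto
            rw [if_neg h1, if_neg h1']
            have h1a : ¬ (PySem.Str.strip x == "") = true := fun hh => h1 (by simp [hh])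
            have h1b : pvStruct (PySem.Str.strip x) = false := by
              cases hc : pvStruct (PySem.Str.strip x)
              · rfl
              · exact absurd (by simp [hc]) h1
            have h2b : pvEndsSent (PySem.Str.strip x) = false := by
              cases hc : pvEndsSent (PySem.Str.strip x)
              · rfl
              · exact absurd hc h2
            have key := (ih rest.length (by subst hl; simp)).2 rest rfl x []
              h1a h1b h2b (by simp)
            simp only [List.nil_append] at key
            rw [← key, pvAgo]
            rw [if_neg h1, if_pos (by simp [h2b])]
    refine ⟨l1, ?_⟩
    intro l hl o bl ho1 ho2 ho3 hbl
    cases l with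
    | nil =>
      have hbl0 : pvAgo bl = bl := by
        have h0 : pvAgo ([] : List String) = [] := by rw [pvAgo]
        have := pvAgo_blank_append bl [] hbl
        simpa [h0] using this
      have lhs : pvAgo (o :: (bl ++ [])) = o :: bl := by
        rw [List.append_nil, pvAgo]
        rw [if_neg (by simp [ho2]; simpa using ho1),
          if_pos (by simp [ho3]), pvSkipBlanks_all_blank bl hbl]
        show o :: pvAgo bl = o :: bl
        rw [hbl0]
      rw [lhs, pvBgo]
    | cons x rest =>
      by_cases hx : (PySem.Str.strip x == "") = true
      · -- blank line: buffer it
        have key := (ih rest.length (by subst hl; simp)).2 rest rfl o (bl ++ [x]) ho1 ho2 ho3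
          (by intro b hb; rcases List.mem_append.mp hb with h | h
              · exact hbl b h
              · simp at h; subst h; exact hx)
        rw [pvBgo]
        simp only [hx, if_pos]
        rw [← key]
        simp
      · -- non-blank line x: A looks it up as the continuation candidate
        have hskip := pvSkipBlanks_blank_append bl x rest hbl hx
        have lhsStep : pvAgo (o :: (bl ++ x :: rest)) =
            (if pvJoinA (PySem.Str.strip x) then
              (PySem.Str.strip o ++ " " ++ PySem.Str.strip x) :: pvAgo rest
            else o :: pvAgo (bl ++ x :: rest)) := by
          rw [pvAgo]
          rw [if_neg (by simp [ho1, ho2]), if_pos (by simp [ho3]), hskip]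
        rw [pvBgo]
        simp only [hx, Bool.false_eq_true, if_false]
        by_cases hj : pvJoinB (PySem.Str.strip x) = true
        · rw [if_pos hj, lhsStep, if_pos (by rw [pvJoinA_eq_pvJoinB _ hx]; exact hj)]
          have := (ih rest.length (by subst hl; simp)).1 rest rfl
          rw [this]
        · rw [if_neg hj, lhsStep, if_neg (by rw [pvJoinA_eq_pvJoinB _ hx]; exact hj)]
          rw [pvAgo_blank_append bl (x :: rest) hbl]
          rw [l1 (x :: rest) hl]

-- ===== VERDICT (by name: the statement is the Claim_ definition above) =====
theorem rejoin_broken_continuations_py_spec : Claim_equal_rejoin_broken_continuations_py := by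
  intro text _
  unfold Spec_rejoin_broken_continuations_py rejoin_broken_continuations_py rejoin_broken_continuations_py_alt
  rw [(pvMain ((PySem.Str.split? text "\n").getD []).length).1 _ rfl]
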